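-- pv_equiv track=rewrite | github.com/vaedprasad/legal-chunking-analysis | src/processor.py | find_closest_or_greater
-- ===== SOURCE A (Python) =====
-- from typing import List, Tuple, Dict
--
-- def find_closest_or_greater(page_numbers: List[int], previous_page: int) -> int:
--     """
--     Finds the first page number in the list that is greater than or equal to the given page number.
--     If no such page exists, returns the closest smaller page number.
--
--     Parameters
--     ----------
--     page_numbers : List[int]
--         A list of integers representing page numbers.
--     previous_page : int
--         The page number to compare against.
--
--     Returns
--     -------
--     int
--         The closest page number from the list that is greater than or equal to `previous_page`.
--
--     Raises
--     ------
--     ValueError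
--         If the input list `page_numbers` is empty.
--
--     Examples
--     --------
--     >>> find_closest_or_greater([2, 3, 5, 10], 4)
--     5
--     >>> find_closest_or_greater([1, 2, 3], 6)
--     3
--     """
--     if len(page_numbers) < 1:
--         raise ValueError(f"Unexpected value: {page_numbers}.")
--     elif len(page_numbers) == 1:
--         return page_numbers[0]
--     page_numbers.sort()  # Sort the list to make it easier to find the closest value
--     closest = page_numbers[0]  # Initialize closest with the first element
--
--     for page_number in page_numbers:
--         if page_number >= previous_page:
--             # If page_number is greater than or equal to previous_page, it's the closest we need
--             return page_number
--         else:
--             # Update closest if page_number is closer to previous_page than the current closest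
--             if abs(page_number - previous_page) < abs(closest - previous_page):
--                 closest = page_number
--
--     return closest
-- ===== SOURCE B (Python) =====
-- import bisect
--
-- def find_closest_or_greater(page_numbers, previous_page):
--     if len(page_numbers) < 1:
--         raise ValueError(f"Unexpected value: {page_numbers}.")
--     elif len(page_numbers) == 1:
--         return page_numbers[0]
--     page_numbers.sort()  # same in-place sort as the original
--     i = bisect.bisect_left(page_numbers, previous_page)
--     return page_numbers[i] if i < len(page_numbers) else page_numbers[-1]
-- ===== Notes on version B (the rewrite author's own statement) =====
-- stated objective: alternative
-- what changed: Replaces the linear scan with abs-distance closest-tracking by a binary search (bisect_left) on the sorted list: the smallest element >= previous_page, else the last (maximum) element.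
import Mathlib
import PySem

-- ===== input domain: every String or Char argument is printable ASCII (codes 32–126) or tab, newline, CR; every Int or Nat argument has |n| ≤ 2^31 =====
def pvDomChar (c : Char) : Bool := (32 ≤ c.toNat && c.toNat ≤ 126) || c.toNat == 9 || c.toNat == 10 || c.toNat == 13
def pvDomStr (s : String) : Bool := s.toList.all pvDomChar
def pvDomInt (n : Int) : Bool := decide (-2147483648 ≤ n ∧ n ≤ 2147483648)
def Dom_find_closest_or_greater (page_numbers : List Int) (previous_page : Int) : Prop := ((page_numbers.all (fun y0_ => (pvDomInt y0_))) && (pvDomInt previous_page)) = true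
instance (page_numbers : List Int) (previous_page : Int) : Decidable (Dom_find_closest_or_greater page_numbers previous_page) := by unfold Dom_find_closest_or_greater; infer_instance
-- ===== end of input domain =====

-- B replaces A's linear scan (with abs-distance closest tracking) by a binary search
-- (bisect_left) over the same sorted list; equivalence is about the return value
-- (both A and B sort the argument in place identically).


-- ===== PORT A =====
-- the for-loop over the sorted list, carrying `closest`
def fcgLoop (previous_page : Int) (closest : Int) : List Int → Int
  | [] => closest
  | p :: rest =>
    if p ≥ previous_page then p
    else if |p - previous_page| < |closest - previous_page| then fcgLoop previous_page p rest
    else fcgLoop previous_page closest rest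

def find_closest_or_greater (page_numbers : List Int) (previous_page : Int) : Int :=
  if page_numbers.length < 1 then 0  -- Python raises ValueError here; excluded by Pre_
  else if page_numbers.length = 1 then (PySem.List.pyGet? page_numbers 0).getD 0
  else
    let s := PySem.List.sorted page_numbers (fun x => x) false
    let closest := (PySem.List.pyGet? s 0).getD 0
    fcgLoop previous_page closest s

-- ===== PORT B =====
def find_closest_or_greater_alt (page_numbers : List Int) (previous_page : Int) : Int :=
  if page_numbers.length < 1 then 0  -- Python raises ValueError here; excluded by Pre_
  else if page_numbers.length = 1 then (PySem.List.pyGet? page_numbers 0).getD 0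
  else
    let s := PySem.List.sorted page_numbers (fun x => x) false
    let i := PySem.List.bisectLeft s previous_page
    if (i : Int) < (s.length : Int) then (PySem.List.pyGet? s (i : Int)).getD 0
    else (PySem.List.pyGet? s (-1)).getD 0

-- ===== PRECONDITION & SPEC =====
-- A raises ValueError exactly on the empty list; both ports return a dummy there.
def Pre_find_closest_or_greater (page_numbers : List Int) (previous_page : Int) : Prop :=
  page_numbers ≠ []
instance (page_numbers : List Int) (previous_page : Int) : Decidable (Pre_find_closest_or_greater page_numbers previous_page) := by unfold Pre_find_closest_or_greater; infer_instance

def pvWitness_find_closest_or_greater : List Int × Int := ([2, 3, 5, 10], 4)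

def Spec_find_closest_or_greater (page_numbers : List Int) (previous_page : Int) (out : Int) : Prop := out = find_closest_or_greater_alt page_numbers previous_page
instance (page_numbers : List Int) (previous_page : Int) (out : Int) : Decidable (Spec_find_closest_or_greater page_numbers previous_page out) := by unfold Spec_find_closest_or_greater; infer_instance

-- ===== CLAIM (what is proved, stated in full; the proofs are below) =====
def Claim_equal_find_closest_or_greater : Prop := ∀ (page_numbers : List Int) (previous_page : Int), Dom_find_closest_or_greater page_numbers previous_page → Pre_find_closest_or_greater page_numbers previous_page → Spec_find_closest_or_greater page_numbers previous_page (find_closest_or_greater page_numbers previous_page)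

-- ===== LEMMAS AND PROOFS =====

-- If a prefix is entirely < previous_page and then an element ≥ previous_page follows,
-- the loop returns that element, whatever `closest` is.
lemma fcgLoop_first_ge (previous_page x : Int) (l2 : List Int) :
    ∀ (l1 : List Int) (c : Int), (∀ a ∈ l1, a < previous_page) → previous_page ≤ x →
      fcgLoop previous_page c (l1 ++ x :: l2) = x := by
  intro l1
  induction l1 with
  | nil => intro c _ hx; simp [fcgLoop, hx]
  | cons p t ih =>
    intro c hlt hx
    have hp : p < previous_page := hlt p (by simp)
    have hstep : fcgLoop previous_page c ((p :: t) ++ x :: l2) =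
        if p ≥ previous_page then p
        else if |p - previous_page| < |c - previous_page| then fcgLoop previous_page p (t ++ x :: l2)
        else fcgLoop previous_page c (t ++ x :: l2) := rfl
    rw [hstep, if_neg (by omega)]
    split <;> exact ih _ (fun a ha => hlt a (by simp [ha])) hx

-- If every element is < previous_page, the loop (started with closest ≤ all elements,
-- closest < previous_page) ends on the last element.
lemma fcgLoop_all_lt (previous_page : Int) :
    ∀ (l : List Int) (c : Int), l.Pairwise (· ≤ ·) → (∀ a ∈ l, a < previous_page) →
      c < previous_page → (∀ a ∈ l, c ≤ a) →
      fcgLoop previous_page c l = l.getLast?.getD c := by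
  intro l
  induction l with
  | nil => intro c _ _ _ _; rfl
  | cons p t ih =>
    intro c hpw hlt hc hle
    have hp : p < previous_page := hlt p (by simp)
    have hcp : c ≤ p := hle p (by simp)
    have hpt : ∀ a ∈ t, p ≤ a := (List.pairwise_cons.mp hpw).1
    have htail : fcgLoop previous_page p t = t.getLast?.getD p :=
      ih p (List.pairwise_cons.mp hpw).2 (fun a ha => hlt a (by simp [ha])) hp hpt
    have hstep : fcgLoop previous_page c (p :: t) =
        if p ≥ previous_page then p
        else if |p - previous_page| < |c - previous_page| then fcgLoop previous_page p t
        else fcgLoop previous_page c t := rfl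
    rw [hstep, if_neg (by omega)]
    have habs : (|p - previous_page| < |c - previous_page|) ↔ c < p := by
      rw [abs_of_nonpos (by omega), abs_of_nonpos (by omega)]; omega
    by_cases h : c < p
    · rw [if_pos (habs.mpr h), htail]
      cases t with
      | nil => simp
      | cons a t' =>
          rw [List.getLast?_eq_some_getLast (l := a :: t') (by simp)]
          rfl
    · have hcp' : c = p := le_antisymm hcp (by omega)
      rw [if_neg (fun hh => h (habs.mp hh)), hcp', htail]
      cases t with
      | nil => simp
      | cons a t' =>
          rw [List.getLast?_eq_some_getLast (l := a :: t') (by simp),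
              List.getLast?_eq_some_getLast (l := p :: a :: t') (by simp)]
          rfl

-- ===== VERDICT (by name: the statement is the Claim_ definition above) =====
theorem find_closest_or_greater_spec : Claim_equal_find_closest_or_greater := by
  intro page_numbers previous_page _ hpre
  unfold Spec_find_closest_or_greater find_closest_or_greater find_closest_or_greater_alt
  by_cases h0 : page_numbers.length < 1
  · simp [h0]
  by_cases h1 : page_numbers.length = 1
  · simp [h1]
  simp only [if_neg h0, if_neg h1]
  set s := PySem.List.sorted page_numbers (fun x => x) false with hs
  have hpw : s.Pairwise (· ≤ ·) := by
    simpa using PySem.List.sorted_pairwise page_numbers (fun x => x)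
  have hlen : s.length = page_numbers.length := PySem.List.length_sorted _ _ _
  have hpos : 0 < s.length := by omega
  obtain ⟨hle, hlt, hge⟩ := PySem.List.bisectLeft_spec s previous_page hpw
  set i := PySem.List.bisectLeft s previous_page with hi
  by_cases hin : i < s.length
  · -- binary search found the first element ≥ previous_page
    rw [if_pos (by exact_mod_cast hin)]
    have hsplit : s = s.take i ++ s[i] :: s.drop (i + 1) := by
      conv_lhs => rw [← List.take_append_drop i s, List.drop_eq_getElem_cons hin]
    have hAx : fcgLoop previous_page ((PySem.List.pyGet? s 0).getD 0) s = s[i] := by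
      conv_lhs => rw [hsplit]
      exact fcgLoop_first_ge previous_page s[i] _ _ _
        (by
          intro a ha
          obtain ⟨j, hj, hja⟩ := List.getElem_of_mem ha
          have hj' : j < i := by
            have hlt' : (s.take i).length = min i s.length := List.length_take
            omega
          have : a = s[j] := by rw [← hja, List.getElem_take]
          exact this ▸ hlt j (by omega) hj')
        (hge i hin le_rfl)
    rw [hAx, PySem.List.pyGet?_natCast, List.getElem?_eq_getElem hin]
    rfl
  · -- no element ≥ previous_page: loop ends on the max = last element
    have hieq : i = s.length := by omega
    rw [if_neg (by exact_mod_cast hin)]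
    have hall : ∀ a ∈ s, a < previous_page := by
      intro a ha
      obtain ⟨j, hj, hja⟩ := List.getElem_of_mem ha
      exact hja ▸ hlt j hj (by omega)
    obtain ⟨m, t, hmt⟩ := List.exists_cons_of_ne_nil (List.ne_nil_of_length_pos hpos)
    have hhead : ∀ y ∈ page_numbers, m ≤ y := by
      intro y hy
      simpa using PySem.List.key_head_sorted_le page_numbers (fun x => x) (hs ▸ hmt) y hy
    have hheads : ∀ a ∈ s, m ≤ a := by
      intro a ha
      exact hhead a ((PySem.List.mem_sorted _ _ _ _).mp (hs ▸ ha))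
    have hc0 : (PySem.List.pyGet? s 0).getD 0 = m := by
      rw [hmt]; simp
    rw [hc0, PySem.List.pyGet?_neg_one,
        fcgLoop_all_lt previous_page s m hpw hall (hall m (by simp [hmt])) hheads]
    have hne : s ≠ [] := by rw [hmt]; simp
    rw [List.getLast?_eq_some_getLast hne]
    rfl
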